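-- pv_equiv track=rewrite | github.com/AntonyJohny/Cryptography-Projects-2025-7A | Secure Notes Hybrid Cryptography 1OX22CS054/ciphers.py | _pairify_for_playfair
-- ===== SOURCE A (Python) =====
-- def _pairify_for_playfair(text):
--     """Given a string of letters (A-Z with J replaced by I), insert X between repeated letters in a digram.
--        Return (padded_text, filler_positions) where filler_positions are indices (0-based) in the padded_text
--        where a filler 'X' was inserted.
--     """
--     i = 0
--     padded = []
--     filler_positions = []
--     while i < len(text):
--         a = text[i]
--         b = text[i+1] if i+1 < len(text) else None
--         if b is None:
--             padded.append(a)
--             padded.append('X')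
--             filler_positions.append(len(padded)-1)
--             i += 1
--         elif a == b:
--             padded.append(a)
--             padded.append('X')
--             filler_positions.append(len(padded)-1)
--             i += 1
--         else:
--             padded.append(a)
--             padded.append(b)
--             i += 2
--     return ''.join(padded), filler_positions
-- ===== SOURCE B (Python) =====
-- def _pairify_for_playfair(text):
--     """Streaming scan carrying one pending character instead of index lookahead."""
--     padded = []
--     filler_positions = []
--     pending = None
--     for c in text:
--         if pending is None:
--             pending = c
--         elif pending == c:
--             padded.append(pending)
--             padded.append('X')
--             filler_positions.append(len(padded) - 1)
--             pending = c
--         else: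
--             padded.append(pending)
--             padded.append(c)
--             pending = None
--     if pending is not None:
--         padded.append(pending)
--         padded.append('X')
--         filler_positions.append(len(padded) - 1)
--     return ''.join(padded), filler_positions
-- ===== Notes on version B (the rewrite author's own statement) =====
-- stated objective: alternative
-- what changed: Replaced the index-with-lookahead while-loop by a single streaming fold over the characters that carries one pending held character, with a final flush for a trailing unpaired character.
import Mathlib
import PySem

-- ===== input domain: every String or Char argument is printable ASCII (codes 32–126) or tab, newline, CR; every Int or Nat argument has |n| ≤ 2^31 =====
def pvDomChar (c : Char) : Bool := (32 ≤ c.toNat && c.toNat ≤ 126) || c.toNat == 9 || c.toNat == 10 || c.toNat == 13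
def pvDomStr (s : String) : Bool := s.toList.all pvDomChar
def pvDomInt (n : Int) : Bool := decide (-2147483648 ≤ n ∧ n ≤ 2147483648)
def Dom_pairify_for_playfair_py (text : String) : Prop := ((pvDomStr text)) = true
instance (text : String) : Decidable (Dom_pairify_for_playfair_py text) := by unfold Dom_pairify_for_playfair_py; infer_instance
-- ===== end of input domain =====

-- B replaces A's index-with-lookahead while-loop by a streaming fold carrying one pending character (alternative decomposition, same cost).

-- ===== PORT A =====
-- A's while-loop over index i, as structural recursion on the suffix text[i:].
def pvPairLoopA : List Char → List Char → List Int → List Char × List Int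
  | [], padded, fill => (padded, fill)
  | [a], padded, fill => (padded ++ [a, 'X'], fill ++ [((padded.length + 1 : Nat) : Int)])
  | a :: b :: rest, padded, fill =>
    if a == b then
      pvPairLoopA (b :: rest) (padded ++ [a, 'X']) (fill ++ [((padded.length + 1 : Nat) : Int)])
    else
      pvPairLoopA rest (padded ++ [a, b]) fill

def pairify_for_playfair_py (text : String) : String × List Int :=
  let r := pvPairLoopA text.toList [] []
  (String.mk r.1, r.2)

-- ===== PORT B =====
-- one step of B's for-loop: state = (padded, filler_positions, pending)
def pvStepB (st : List Char × List Int × Option Char) (c : Char) : List Char × List Int × Option Char :=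
  match st with
  | (padded, fill, none) => (padded, fill, some c)
  | (padded, fill, some p) =>
    if p == c then (padded ++ [p, 'X'], fill ++ [((padded.length + 1 : Nat) : Int)], some c)
    else (padded ++ [p, c], fill, none)

-- B's final flush of a still-pending character
def pvFinB (st : List Char × List Int × Option Char) : List Char × List Int :=
  match st with
  | (padded, fill, none) => (padded, fill)
  | (padded, fill, some p) => (padded ++ [p, 'X'], fill ++ [((padded.length + 1 : Nat) : Int)])

def pairify_for_playfair_py_alt (text : String) : String × List Int :=
  let r := pvFinB (text.toList.foldl pvStepB ([], [], none))
  (String.mk r.1, r.2)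

-- ===== PRECONDITION & SPEC =====
def Spec_pairify_for_playfair_py (text : String) (out : String × List Int) : Prop := out = pairify_for_playfair_py_alt text
instance (text : String) (out : String × List Int) : Decidable (Spec_pairify_for_playfair_py text out) := by unfold Spec_pairify_for_playfair_py; infer_instance

-- ===== CLAIM (what is proved, stated in full; the proofs are below) =====
def Claim_equal_pairify_for_playfair_py : Prop := ∀ (text : String), Dom_pairify_for_playfair_py text → Spec_pairify_for_playfair_py text (pairify_for_playfair_py text)

-- ===== LEMMAS AND PROOFS =====
-- Invariant: A's loop on a suffix equals B's fold on that suffix, both with pending = none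
-- (first conjunct) and with pending = some a, i.e. a = text[i] already read (second conjunct).
lemma pvMain : ∀ (n : Nat) (cs : List Char), cs.length ≤ n →
    ((∀ padded fill, pvPairLoopA cs padded fill = pvFinB (cs.foldl pvStepB (padded, fill, none))) ∧
     (∀ a padded fill, pvPairLoopA (a :: cs) padded fill = pvFinB (cs.foldl pvStepB (padded, fill, some a)))) := by
  intro n
  induction n with
  | zero =>
    intro cs h
    have hcs : cs = [] := List.eq_nil_of_length_eq_zero (Nat.le_zero.mp h)
    subst hcs
    exact ⟨fun padded fill => by simp [pvPairLoopA, pvFinB],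
           fun a padded fill => by simp [pvPairLoopA, pvFinB]⟩
  | succ n ih =>
    intro cs h
    match cs with
    | [] =>
      exact ⟨fun padded fill => by simp [pvPairLoopA, pvFinB],
             fun a padded fill => by simp [pvPairLoopA, pvFinB]⟩
    | c :: rest =>
      have hr : rest.length ≤ n := by simpa using Nat.lt_succ_iff.mp (by simpa using h)
      obtain ⟨ih1, ih2⟩ := ih rest hr
      refine ⟨fun padded fill => ?_, fun a padded fill => ?_⟩
      · simpa [List.foldl, pvStepB] using ih2 c padded fill
      · by_cases hac : a = c
        · subst hac
          simpa [pvPairLoopA, List.foldl, pvStepB] using ih2 a (padded ++ [a, 'X']) (fill ++ [((padded.length + 1 : Nat) : Int)])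
        · simpa [pvPairLoopA, List.foldl, pvStepB, hac] using ih1 (padded ++ [a, c]) fill

-- ===== VERDICT (by name: the statement is the Claim_ definition above) =====
theorem pairify_for_playfair_py_spec : Claim_equal_pairify_for_playfair_py := by
  intro text _
  unfold Spec_pairify_for_playfair_py pairify_for_playfair_py pairify_for_playfair_py_alt
  rw [(pvMain text.toList.length text.toList le_rfl).1 [] []]
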